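-- pv_equiv track=rewrite | github.com/Enjef/Algo | 1817 - Finding the Users Active Minutes/1817 - Finding the Users Active Minutes.py | findingUsersActiveMinutes_best_memory
-- ===== SOURCE A (Python) =====
-- from typing import List
--
-- def findingUsersActiveMinutes_best_memory(
--
--         logs: List[List[int]],
--         k: int) -> List[int]:
--     a = []
--     for i in range(k):
--         a.append(0)
--     logs.sort(key=lambda x: (x[0], x[1]))
--     i = 0
--     while(i < len(logs)):
--         j = i + 1
--         if(j >= len(logs)):
--             break
--         if(logs[i] == logs[j]):
--             logs.pop(j)
--         else:
--             i += 1
--     i = 0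
--     while(i < len(logs)):
--         j = i
--         count = 0
--         while(logs[i][0] == logs[j][0]):
--             count += 1
--             j += 1
--             if(j == len(logs)):
--                 break
--         a[count-1] = a[count-1]+1
--         i = j
--     return a
-- ===== SOURCE B (Python) =====
-- from typing import List
--
-- def findingUsersActiveMinutes_best_memory(logs: List[List[int]], k: int) -> List[int]:
--     s = sorted(logs, key=lambda x: (x[0], x[1]))
--     counts = {}
--     last = None
--     for x in s:
--         if x != last:
--             counts[x[0]] = counts.get(x[0], 0) + 1
--             last = x
--     a = [0] * k
--     for c in counts.values():
--         a[c - 1] += 1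
--     return a
-- ===== Notes on version B (the rewrite author's own statement) =====
-- stated objective: simpler
-- what changed: A sorts logs in place, removes adjacent duplicates with a quadratic pop() loop, then counts runs with nested index-juggling while loops; B sorts a copy and does one linear scan that skips adjacent duplicates and tallies per user in a dict, then reads the tallies off the dict values (no pop loop, no re-scanning). A mutates `logs` in place; B does not - the equivalence is about the return value only.
import Mathlib
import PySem

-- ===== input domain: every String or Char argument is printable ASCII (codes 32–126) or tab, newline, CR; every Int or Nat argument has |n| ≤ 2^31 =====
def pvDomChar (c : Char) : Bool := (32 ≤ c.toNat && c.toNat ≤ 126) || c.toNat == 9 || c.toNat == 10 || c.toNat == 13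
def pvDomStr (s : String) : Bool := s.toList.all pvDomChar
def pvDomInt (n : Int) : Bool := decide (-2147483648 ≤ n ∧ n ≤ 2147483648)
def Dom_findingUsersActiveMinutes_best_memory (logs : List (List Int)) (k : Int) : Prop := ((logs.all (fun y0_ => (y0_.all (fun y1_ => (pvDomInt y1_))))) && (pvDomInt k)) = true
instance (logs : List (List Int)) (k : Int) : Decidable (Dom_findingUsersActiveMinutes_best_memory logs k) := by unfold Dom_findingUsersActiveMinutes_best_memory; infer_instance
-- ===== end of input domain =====

-- B replaces A's in-place adjacent-dedup-by-pop loop and its nested index-juggling while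
-- loops with a sorted COPY, one linear scan that skips adjacent duplicates, and a dict tally
-- per user (simpler; removes the quadratic pop loop).
-- NOTE: Python A sorts and pops `logs` IN PLACE; B does not mutate it. The equivalence
-- proved here is about the RETURN value only.

-- ===== PORT A =====

-- a[i] = a[i] + 1 at Nat index i; exact for i < a.length (Pre_ guarantees this; Python raises IndexError otherwise)
def pvBump (a : List Int) (i : Nat) : List Int := a.set i (a.getD i 0 + 1)

-- the adjacent-duplicate removal: while i < len(logs): j = i+1; if logs[i] == logs[j]: logs.pop(j) else i += 1
def pvDedup : List (List Int) → List (List Int)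
  | [] => []
  | [x] => [x]
  | x :: y :: r => if x = y then pvDedup (x :: r) else x :: pvDedup (y :: r)
termination_by l => l.length

-- the inner while loop: while logs[i][0] == logs[j][0]: count += 1; j += 1; if j == len(logs): break
-- (called on the suffix starting at i; returns (count, suffix from j))
def pvTakeRun (u : Int) : List (List Int) → Nat × List (List Int)
  | [] => (0, [])
  | x :: r =>
    if PySem.List.pyGetD x 0 0 = u then ((pvTakeRun u r).1 + 1, (pvTakeRun u r).2)
    else (0, x :: r)

-- termination helper for pvCountLoop (cited in decreasing_by)
lemma pvTakeRun_snd_le (u : Int) (l : List (List Int)) : (pvTakeRun u l).2.length ≤ l.length := by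
  induction l with
  | nil => simp [pvTakeRun]
  | cons x r ih =>
    simp only [pvTakeRun]
    split
    · simpa using Nat.le_trans ih (Nat.le_succ _)
    · simp

-- the outer while loop: i = 0; while i < len(logs): ... a[count-1] = a[count-1]+1; i = j
def pvCountLoop (a : List Int) (s : List (List Int)) : List Int :=
  match s with
  | [] => a
  | x :: r =>
    let p := pvTakeRun (PySem.List.pyGetD x 0 0) (x :: r)
    pvCountLoop (pvBump a (p.1 - 1)) p.2
termination_by s.length
decreasing_by
  simp only [pvTakeRun]
  exact Nat.lt_succ_of_le (pvTakeRun_snd_le _ _)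

def findingUsersActiveMinutes_best_memory (logs : List (List Int)) (k : Int) : List Int :=
  -- a = []; for i in range(k): a.append(0)
  let a : List Int := List.replicate k.toNat 0
  -- logs.sort(key=lambda x: (x[0], x[1]))  (x[0], x[1] via pyGetD: exact on the length-≥2 entries Pre_ admits)
  let s := PySem.List.sorted2 logs (fun x => PySem.List.pyGetD x 0 0) (fun x => PySem.List.pyGetD x 1 0)
  pvCountLoop a (pvDedup s)

-- ===== PORT B =====
def findingUsersActiveMinutes_best_memory_alt (logs : List (List Int)) (k : Int) : List Int :=
  -- s = sorted(logs, key=lambda x: (x[0], x[1]))   (a sorted copy; logs itself stays untouched)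
  let s := PySem.List.sorted2 logs (fun x => PySem.List.pyGetD x 0 0) (fun x => PySem.List.pyGetD x 1 0)
  -- counts = {}; last = None
  -- for x in s:
  --     if x != last: counts[x[0]] = counts.get(x[0], 0) + 1; last = x
  -- (state = (last, counts); `x != last` is `st.1 ≠ some x`, never true for last = None)
  let st := s.foldl (fun (st : Option (List Int) × PySem.Dict Int Int) x =>
      if st.1 ≠ some x then
        (some x, st.2.insert (PySem.List.pyGetD x 0 0) (st.2.getD (PySem.List.pyGetD x 0 0) 0 + 1))
      else st)
    (none, PySem.Dict.empty)
  -- a = [0] * k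
  let a : List Int := List.replicate k.toNat 0
  -- for c in counts.values(): a[c - 1] += 1   (every stored c is ≥ 1, so c - 1 is a plain index)
  st.2.values.foldl (fun a c => pvBump a (c - 1).toNat) a

-- ===== PRECONDITION & SPEC =====

-- helpers of Pre_ only: stated on the INPUT (original indices and the (x[0],x[1]) sort keys),
-- not by running either port's sort/dedup/count loops.
-- key equality of two entries under the sort key (x[0], x[1])
def pvKey2Eq (x y : List Int) : Bool :=
  (PySem.List.pyGetD x 0 0 == PySem.List.pyGetD y 0 0) &&
  (PySem.List.pyGetD x 1 0 == PySem.List.pyGetD y 1 0)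

-- entry i is counted (not removed as a duplicate): no earlier identical entry whose
-- last same-key successor before i is still identical to entry i
def pvSurvives (logs : List (List Int)) (i : Nat) : Bool :=
  (List.range i).all (fun j =>
    !(logs.getD j [] == logs.getD i []) ||
    (List.range i).any (fun j' =>
      decide (j < j') && pvKey2Eq (logs.getD j' []) (logs.getD i []) &&
      !(logs.getD j' [] == logs.getD i [])))

-- number of counted entries of user u
def pvSurvCount (logs : List (List Int)) (u : Int) : Nat :=
  ((List.range logs.length).filter (fun i =>
    (PySem.List.pyGetD (logs.getD i []) 0 0 == u) && pvSurvives logs i)).length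

-- Pre_ excludes exactly the inputs on which the Python A raises IndexError (and B raises with
-- it): an entry shorter than 2 makes the sort key x[1] raise, and a user whose number of
-- surviving (non-duplicate) entries exceeds k makes a[count-1] raise.
def Pre_findingUsersActiveMinutes_best_memory (logs : List (List Int)) (k : Int) : Prop :=
  (∀ x ∈ logs, 2 ≤ x.length) ∧
  ∀ u ∈ logs.map (fun x => PySem.List.pyGetD x 0 0), (pvSurvCount logs u : Int) ≤ k

instance (logs : List (List Int)) (k : Int) : Decidable (Pre_findingUsersActiveMinutes_best_memory logs k) := by
  unfold Pre_findingUsersActiveMinutes_best_memory; infer_instance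

def pvWitness_findingUsersActiveMinutes_best_memory : List (List Int) × Int := ([[1, 5], [1, 6], [2, 5]], 2)

def Spec_findingUsersActiveMinutes_best_memory (logs : List (List Int)) (k : Int) (out : List Int) : Prop := out = findingUsersActiveMinutes_best_memory_alt logs k
instance (logs : List (List Int)) (k : Int) (out : List Int) : Decidable (Spec_findingUsersActiveMinutes_best_memory logs k out) := by unfold Spec_findingUsersActiveMinutes_best_memory; infer_instance

-- ===== CLAIM (what is proved, stated in full; the proofs are below) =====
def Claim_equal_findingUsersActiveMinutes_best_memory : Prop := ∀ (logs : List (List Int)) (k : Int), Dom_findingUsersActiveMinutes_best_memory logs k → Pre_findingUsersActiveMinutes_best_memory logs k → Spec_findingUsersActiveMinutes_best_memory logs k (findingUsersActiveMinutes_best_memory logs k)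

-- ===== LEMMAS AND PROOFS =====

-- abbreviations for the proofs
def pvFst (x : List Int) : Int := PySem.List.pyGetD x 0 0
def pvSnd (x : List Int) : Int := PySem.List.pyGetD x 1 0
def pvLexLe (x y : List Int) : Prop := pvFst x < pvFst y ∨ (pvFst x = pvFst y ∧ pvSnd x ≤ pvSnd y)
def pvLexLt (x y : List Int) : Prop := pvFst x < pvFst y ∨ (pvFst x = pvFst y ∧ pvSnd x < pvSnd y)
def pvFstLe (x y : List Int) : Prop := pvFst x ≤ pvFst y
def pvBef (a b : List Int) : Bool :=
  decide (pvFst a < pvFst b) || (!decide (pvFst b < pvFst a) && decide (pvSnd a < pvSnd b))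
def pvUsers (s : List (List Int)) : List Int := PySem.Set.ofList (s.map pvFst)
def pvS (logs : List (List Int)) : List (List Int) :=
  pvDedup (PySem.List.sorted2 logs (fun x => PySem.List.pyGetD x 0 0) (fun x => PySem.List.pyGetD x 1 0) false)

lemma pvBef_true_iff (a b : List Int) : pvBef a b = true ↔ pvLexLt a b := by
  simp [pvBef, pvLexLt]; omega

lemma pvBef_false_iff (a b : List Int) : pvBef a b = false ↔ pvLexLe b a := by
  simp [pvBef, pvLexLe]; omega

lemma insertBy_cons (bef : List Int → List Int → Bool) (x y : List Int) (ys : List (List Int)) :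
    PySem.List.insertBy bef x (y :: ys) = if bef x y then x :: y :: ys else y :: PySem.List.insertBy bef x ys := rfl

lemma pvLexLe_trans {a b c : List Int} (h1 : pvLexLe a b) (h2 : pvLexLe b c) : pvLexLe a c := by
  unfold pvLexLe at *; omega

lemma insertBy_lex_pairwise (x : List Int) (acc : List (List Int)) (h : acc.Pairwise pvLexLe) :
    (PySem.List.insertBy pvBef x acc).Pairwise pvLexLe := by
  induction acc with
  | nil => simp [PySem.List.insertBy]
  | cons y ys ih =>
    rw [insertBy_cons]
    rcases List.pairwise_cons.mp h with ⟨hy, hys⟩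
    by_cases hb : pvBef x y = true
    · have hxy : pvLexLt x y := (pvBef_true_iff _ _).mp hb
      rw [if_pos hb]
      refine List.pairwise_cons.mpr ⟨?_, h⟩
      intro z hz
      rcases List.mem_cons.mp hz with rfl | hz
      · unfold pvLexLt pvLexLe at *; omega
      · exact pvLexLe_trans (by unfold pvLexLt pvLexLe at *; omega) (hy z hz)
    · have hyx : pvLexLe y x := (pvBef_false_iff _ _).mp (by simpa using hb)
      rw [if_neg hb]
      refine List.pairwise_cons.mpr ⟨?_, ih hys⟩
      intro z hz
      rcases (PySem.List.mem_insertBy _ _ _ _).mp hz with rfl | hz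
      · exact hyx
      · exact hy z hz

lemma sorted2_lex_pairwise (logs : List (List Int)) :
    (PySem.List.sorted2 logs (fun x => PySem.List.pyGetD x 0 0) (fun x => PySem.List.pyGetD x 1 0) false).Pairwise pvLexLe := by
  have key : ∀ (l acc : List (List Int)), acc.Pairwise pvLexLe →
      (l.foldl (fun acc x => PySem.List.insertBy pvBef x acc) acc).Pairwise pvLexLe := by
    intro l
    induction l with
    | nil => intro acc h; simpa using h
    | cons x t ih => intro acc h; exact ih _ (insertBy_lex_pairwise x acc h)
  have hdef : PySem.List.sorted2 logs (fun x => PySem.List.pyGetD x 0 0) (fun x => PySem.List.pyGetD x 1 0) false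
      = logs.foldl (fun acc x => PySem.List.insertBy pvBef x acc) [] := rfl
  rw [hdef]
  exact key logs [] (by simp)

lemma pvDedup_sublist : ∀ (l : List (List Int)), (pvDedup l).Sublist l := by
  intro l
  induction l using pvDedup.induct with
  | case1 => simp [pvDedup]
  | case2 x => simp [pvDedup]
  | case3 y r ih =>
    rw [pvDedup, if_pos rfl]
    exact ih.trans ((List.sublist_cons_self y r).cons₂ y)
  | case4 x y r hne ih =>
    rw [pvDedup, if_neg hne]
    exact ih.cons₂ x

lemma pvS_pairwise_fst (logs : List (List Int)) : (pvS logs).Pairwise pvFstLe :=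
  List.Pairwise.sublist (pvDedup_sublist _)
    ((sorted2_lex_pairwise logs).imp (fun {a b} h => by unfold pvLexLe pvFstLe at *; omega))

lemma pvTakeRun_eq (u : Int) (l : List (List Int)) :
    pvTakeRun u l = ((l.takeWhile (fun z => pvFst z == u)).length, l.dropWhile (fun z => pvFst z == u)) := by
  induction l with
  | nil => simp [pvTakeRun]
  | cons z t ih =>
    by_cases h : PySem.List.pyGetD z 0 0 = u
    · simp [pvTakeRun, h, pvFst, ih]
    · simp [pvTakeRun, h, pvFst]

lemma dropWhile_fst_ne (u : Int) : ∀ (l : List (List Int)), l.Pairwise pvFstLe → (∀ z ∈ l, u ≤ pvFst z) →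
    ∀ z ∈ l.dropWhile (fun z => pvFst z == u), pvFst z ≠ u := by
  intro l
  induction l with
  | nil => simp
  | cons y t ih =>
    intro hpw hge z hz
    by_cases hy : pvFst y = u
    · rw [List.dropWhile_cons_of_pos (by simpa using hy)] at hz
      exact ih (List.pairwise_cons.mp hpw).2 (fun w hw => hge w (by simp [hw])) z hz
    · rw [List.dropWhile_cons_of_neg (by simpa using hy)] at hz
      rcases List.mem_cons.mp hz with rfl | hzt
      · exact hy
      · have h1 : pvFstLe y z := (List.pairwise_cons.mp hpw).1 z hzt
        have h2 : u ≤ pvFst y := hge y (by simp)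
        unfold pvFstLe at h1; omega

lemma foldl_add_of_mem : ∀ (l : List Int) (s : PySem.Set Int), (∀ a ∈ l, s.contains a) →
    l.foldl PySem.Set.add s = s := by
  intro l
  induction l with
  | nil => simp
  | cons a t ih =>
    intro s hs
    have hadd : PySem.Set.add s a = s := by
      unfold PySem.Set.add; rw [if_pos (hs a (by simp))]
    simpa [hadd] using ih s (fun b hb => hs b (by simp [hb]))

lemma foldl_add_cons_notmem (u : Int) : ∀ (l : List Int) (s : List Int), u ∉ l →
    l.foldl PySem.Set.add (u :: s) = u :: l.foldl PySem.Set.add s := by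
  intro l
  induction l with
  | nil => simp
  | cons a t ih =>
    intro s hu
    have hau : ¬(a = u) := fun h => hu (by simp [h])
    have hone : PySem.Set.add (u :: s) a = u :: PySem.Set.add s a := by
      simp [PySem.Set.add, PySem.Set.contains, hau]
      split <;> simp
    rw [List.foldl_cons, hone, List.foldl_cons, ih _ (fun h => hu (by simp [h]))]

lemma ofList_cons_block (u : Int) (l1 l2 : List Int) (h1 : ∀ a ∈ l1, a = u) (h2 : u ∉ l2) :
    PySem.Set.ofList (u :: (l1 ++ l2)) = u :: PySem.Set.ofList l2 := by
  show List.foldl PySem.Set.add PySem.Set.empty (u :: (l1 ++ l2)) = _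
  rw [List.foldl_cons, List.foldl_append]
  have hadd : PySem.Set.add PySem.Set.empty u = [u] := by
    simp [PySem.Set.add, PySem.Set.empty]
  rw [hadd, foldl_add_of_mem l1 [u] (fun a ha => by simp [h1 a ha])]
  exact foldl_add_cons_notmem u l2 [] h2

-- the outer while loop, characterized on any fst-grouped list
lemma pvCountLoop_eq (n : Nat) : ∀ (s : List (List Int)) (a : List Int), s.length ≤ n → s.Pairwise pvFstLe →
    pvCountLoop a s = (pvUsers s).foldl
      (fun acc u => pvBump acc ((s.filter (fun x => pvFst x == u)).length - 1)) a := by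
  induction n with
  | zero =>
    intro s a hle _
    have hs : s = [] := List.eq_nil_of_length_eq_zero (Nat.le_zero.mp hle)
    subst hs; simp [pvCountLoop, pvUsers, PySem.Set.ofList]
  | succ n ih =>
    intro s a hle hpw
    match s with
    | [] => simp [pvCountLoop, pvUsers, PySem.Set.ofList]
    | x :: r =>
      have hle' : r.length ≤ n := by simpa using hle
      rcases List.pairwise_cons.mp hpw with ⟨hx, hr⟩
      have hge : ∀ z ∈ r, pvFst x ≤ pvFst z := fun z hz => hx z hz
      have hne : ∀ z ∈ r.dropWhile (fun z => pvFst z == pvFst x), pvFst z ≠ pvFst x :=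
        dropWhile_fst_ne (pvFst x) r hr hge
      have hfw : ∀ z ∈ r.takeWhile (fun z => pvFst z == pvFst x), pvFst z = pvFst x := fun z hz => by
        have := List.mem_takeWhile_imp hz; simpa using this
      -- the loop step
      have hstep : pvCountLoop a (x :: r) =
          pvCountLoop (pvBump a ((pvTakeRun (pvFst x) (x :: r)).1 - 1)) (pvTakeRun (pvFst x) (x :: r)).2 := by
        rw [pvCountLoop]; rfl
      have htr : pvTakeRun (pvFst x) (x :: r)
          = ((r.takeWhile (fun z => pvFst z == pvFst x)).length + 1, r.dropWhile (fun z => pvFst z == pvFst x)) := by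
        rw [pvTakeRun_eq]
        rw [List.takeWhile_cons_of_pos (by simp), List.dropWhile_cons_of_pos (by simp)]
        simp
      -- the filter facts
      have hfilt : (x :: r).filter (fun z => pvFst z == pvFst x) = x :: r.takeWhile (fun z => pvFst z == pvFst x) := by
        rw [List.filter_cons_of_pos (by simp)]
        congr 1
        conv_lhs => rw [← List.takeWhile_append_dropWhile (p := fun z => pvFst z == pvFst x) (l := r)]
        rw [List.filter_append, List.filter_eq_self.mpr (fun z hz => by simpa using hfw z hz),
            List.filter_eq_nil_iff.mpr (fun z hz => by simpa using hne z hz), List.append_nil]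
      have hfilt2 : ∀ u', u' ≠ pvFst x →
          (x :: r).filter (fun z => pvFst z == u')
            = (r.dropWhile (fun z => pvFst z == pvFst x)).filter (fun z => pvFst z == u') := by
        intro u' hu'
        rw [List.filter_cons_of_neg (by simpa using Ne.symm hu')]
        conv_lhs => rw [← List.takeWhile_append_dropWhile (p := fun z => pvFst z == pvFst x) (l := r)]
        rw [List.filter_append, List.filter_eq_nil_iff.mpr (fun z hz => by
              simp only [beq_iff_eq]; rw [hfw z hz]; exact Ne.symm hu'), List.nil_append]
      have husers : pvUsers (x :: r)
          = pvFst x :: pvUsers (r.dropWhile (fun z => pvFst z == pvFst x)) := by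
        unfold pvUsers
        conv_lhs => rw [← List.takeWhile_append_dropWhile (p := fun z => pvFst z == pvFst x) (l := r)]
        rw [List.map_cons, List.map_append]
        rw [ofList_cons_block (pvFst x) _ _
              (fun a ha => by rcases List.mem_map.mp ha with ⟨z, hz, rfl⟩; exact hfw z hz)
              (fun ha => by rcases List.mem_map.mp ha with ⟨z, hz, he⟩; exact hne z hz he)]
      -- pairwise / length for the recursive call
      have hpwdw : (r.dropWhile (fun z => pvFst z == pvFst x)).Pairwise pvFstLe :=
        List.Pairwise.sublist (List.dropWhile_sublist _) hr
      have hlendw : (r.dropWhile (fun z => pvFst z == pvFst x)).length ≤ n :=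
        le_trans (List.Sublist.length_le (List.dropWhile_sublist _)) hle'
      -- put it together
      rw [hstep, htr]
      simp only [Nat.add_sub_cancel]
      rw [ih _ _ hlendw hpwdw]
      rw [husers, List.foldl_cons]
      have hhead : pvBump a (((x :: r).filter (fun z => pvFst z == pvFst x)).length - 1)
          = pvBump a (r.takeWhile (fun z => pvFst z == pvFst x)).length := by
        rw [hfilt]; simp
      rw [hhead]
      apply PySem.List.foldl_congr_mem
      intro acc u' hu'
      have hu'dw : u' ≠ pvFst x := by
        rcases List.mem_map.mp ((PySem.Set.mem_ofList _ _).mp hu') with ⟨z, hz, rfl⟩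
        exact hne z hz
      rw [hfilt2 u' hu'dw]

lemma A_char (logs : List (List Int)) (k : Int) :
    findingUsersActiveMinutes_best_memory logs k
      = (pvUsers (pvS logs)).foldl
          (fun acc u => pvBump acc (((pvS logs).filter (fun x => pvFst x == u)).length - 1))
          (List.replicate k.toNat 0) := by
  have h0 : findingUsersActiveMinutes_best_memory logs k
      = pvCountLoop (List.replicate k.toNat 0) (pvS logs) := rfl
  rw [h0]
  exact pvCountLoop_eq (pvS logs).length _ _ le_rfl (pvS_pairwise_fst logs)

-- B's scan state: the entries the `if x != last` test keeps
def pvKeep (last : Option (List Int)) : List (List Int) → List (List Int)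
  | [] => []
  | x :: r => if last ≠ some x then x :: pvKeep (some x) r else pvKeep last r

lemma fold_step_counts : ∀ (l : List (List Int)) (last : Option (List Int)) (d : PySem.Dict Int Int),
    (l.foldl (fun (st : Option (List Int) × PySem.Dict Int Int) x =>
        if st.1 ≠ some x then
          (some x, st.2.insert (PySem.List.pyGetD x 0 0) (st.2.getD (PySem.List.pyGetD x 0 0) 0 + 1))
        else st) (last, d)).2
      = (pvKeep last l).foldl (fun d x => d.insert (pvFst x) (d.getD (pvFst x) 0 + 1)) d := by
  intro l
  induction l with
  | nil => intro last d; rfl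
  | cons x r ih =>
    intro last d
    by_cases h : last ≠ some x
    · rw [List.foldl_cons, if_pos h, pvKeep, if_pos h, List.foldl_cons]
      exact ih (some x) _
    · rw [List.foldl_cons, if_neg h, pvKeep, if_neg h]
      exact ih last d

lemma pvKeep_some_eq : ∀ (r : List (List Int)) (x : List Int),
    pvDedup (x :: r) = x :: pvKeep (some x) r := by
  intro r
  induction r with
  | nil => intro x; rw [pvDedup, pvKeep]
  | cons y r' ih =>
    intro x
    by_cases h : x = y
    · rw [pvDedup, if_pos h, ih x, pvKeep, if_neg (by simp [h])]
    · rw [pvDedup, if_neg h, pvKeep, if_pos (by simpa using h), ih y]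

lemma pvKeep_none_eq (l : List (List Int)) : pvKeep none l = pvDedup l := by
  cases l with
  | nil => simp [pvKeep, pvDedup]
  | cons x r => rw [pvKeep, if_pos (by simp), pvKeep_some_eq]

lemma count_map_fst (l : List (List Int)) (u : Int) :
    (l.map pvFst).count u = (l.filter (fun x => pvFst x == u)).length := by
  rw [← List.countP_eq_length_filter]
  induction l with
  | nil => rfl
  | cons x r ih => simp [List.count_cons, List.countP_cons, ih]

lemma alt_char (logs : List (List Int)) (k : Int) :
    findingUsersActiveMinutes_best_memory_alt logs k
      = (pvUsers (pvS logs)).foldl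
          (fun acc u => pvBump acc ((((pvS logs).filter (fun x => pvFst x == u)).length : Int) - 1).toNat)
          (List.replicate k.toNat 0) := by
  simp only [findingUsersActiveMinutes_best_memory_alt]
  rw [fold_step_counts, pvKeep_none_eq]
  have hmap : (pvDedup (PySem.List.sorted2 logs (fun x => PySem.List.pyGetD x 0 0) (fun x => PySem.List.pyGetD x 1 0) false)).foldl
      (fun (d : PySem.Dict Int Int) x => d.insert (pvFst x) (d.getD (pvFst x) 0 + 1)) PySem.Dict.empty
      = ((pvS logs).map pvFst).foldl (fun (d : PySem.Dict Int Int) u => d.insert u (d.getD u 0 + 1)) PySem.Dict.empty := by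
    rw [List.foldl_map]; rfl
  rw [hmap, PySem.Dict.foldl_insert_getD_add_one_eq_counter]
  have hvals : (PySem.Dict.counter ((pvS logs).map pvFst)).values
      = (pvUsers (pvS logs)).map (fun u => ((((pvS logs).map pvFst).count u : Int))) := by
    show (PySem.Dict.counter ((pvS logs).map pvFst)).items.map (fun p => p.2) = _
    rw [PySem.Dict.items_counter, List.map_map]
    rfl
  rw [hvals, List.foldl_map]
  apply PySem.List.foldl_congr_mem
  intro acc u _
  rw [count_map_fst]

-- ===== VERDICT (by name: the statement is the Claim_ definition above) =====
theorem findingUsersActiveMinutes_best_memory_spec : Claim_equal_findingUsersActiveMinutes_best_memory := by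
  intro logs k _hdom _hpre
  unfold Spec_findingUsersActiveMinutes_best_memory
  rw [A_char logs k, alt_char logs k]
  apply PySem.List.foldl_congr_mem
  intro acc u _
  have : ((((pvS logs).filter (fun x => pvFst x == u)).length : Int) - 1).toNat
      = ((pvS logs).filter (fun x => pvFst x == u)).length - 1 := by omega
  rw [this]
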